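-- pv_equiv track=rewrite | github.com/dzioura/dna-python | level_two/SequenceDbClass.py | _overlap_back
-- ===== SOURCE A (Python) =====
-- def _overlap_back(sample, sequence):
--     """
--         Check in sample overlaps sequence from the back
--         Attributes:
--             sample (string): DNA sequence sample to find. Must only
--                              contain 'A','C','G' and 'T'.
--             sequence_id (int): Sequence ID assigned to DNA sequence.
--         Return:
--             Boolean. True if sample overlaps the sequence. False otherwise
--     """
--     overlaps = False
--     # Get length of sample
--     count = len(sample)
--     # Get length of sample from the end of the sequence
--     substring = sequence[-count:]
--     while(count > 0):
--         # Check if we have a match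
--         if (sample == substring):
--             overlaps = True
--             break
--         else:
--             # When there is no match remove a character from the end of
--             # the sample and the beginning of the sequence substring
--             count -= 1
--             sample = sample[:-1]
--             substring = substring[-count:]
--     return overlaps
-- ===== SOURCE B (Python) =====
-- def _overlap_back(sample, sequence):
--     """KMP automaton: scan sequence once against sample's failure table; the
--     final automaton state is the longest prefix of sample that is a suffix of
--     sequence, so the overlap exists iff that state is non-zero."""
--     m, n = len(sample), len(sequence)
--     if m == 0:
--         return False
--     # failure table: border[j] = length of longest proper border of sample[:j]
--     border = [0] * (m + 1)
--     k = 0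
--     for j in range(1, m):
--         while k > 0 and sample[k] != sample[j]:
--             k = border[k]
--         if sample[k] == sample[j]:
--             k += 1
--         border[j + 1] = k
--     # scan: j = longest prefix of sample that is a suffix of the text read so far
--     j = 0
--     for i in range(n):
--         while j == m or (j > 0 and sample[j] != sequence[i]):
--             j = border[j]
--         if sample[j] == sequence[i]:
--             j += 1
--     return j > 0
-- ===== Notes on version B (the rewrite author's own statement) =====
-- stated objective: faster
-- what changed: Replaces A's quadratic shrink-and-recompare loop (repeatedly slicing sample and the sequence suffix) by a KMP failure-table scan of sequence whose final automaton state is the longest prefix of sample that is a suffix of sequence.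
import Mathlib
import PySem

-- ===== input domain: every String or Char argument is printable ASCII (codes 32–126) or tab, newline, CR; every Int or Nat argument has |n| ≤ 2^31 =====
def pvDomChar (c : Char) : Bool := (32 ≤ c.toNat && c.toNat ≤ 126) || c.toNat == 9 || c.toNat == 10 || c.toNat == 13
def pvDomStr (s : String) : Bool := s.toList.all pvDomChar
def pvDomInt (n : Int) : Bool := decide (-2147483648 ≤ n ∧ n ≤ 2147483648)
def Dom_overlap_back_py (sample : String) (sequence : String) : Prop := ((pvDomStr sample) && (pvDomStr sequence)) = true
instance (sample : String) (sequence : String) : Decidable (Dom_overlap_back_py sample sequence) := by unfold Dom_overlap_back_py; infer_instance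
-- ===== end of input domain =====

-- B replaces A's shrink-and-recompare loop by a KMP failure-table scan of `sequence` whose final
-- automaton state is the longest prefix of `sample` that is a suffix of `sequence` (linear-time
-- scan in place of A's worst-case quadratic re-comparison).

-- ===== PORT A =====
-- the while loop of A: state = (sample, substring, count); recursion on count (count -= 1 each turn)
def aLoop : List Char → List Char → Nat → Bool
  | _, _, 0 => false
  | smp, sub, c + 1 =>
    if smp = sub then true
    else aLoop (PySem.List.slice smp none (some (-1)))        -- sample[:-1]
               (PySem.List.slice sub (some (-(c : Int))) none) -- substring[-count:] after count -= 1
               c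

def overlap_back_py (sample : String) (sequence : String) : Bool :=
  let s := sample.toList
  let t := sequence.toList
  -- substring = sequence[-count:] with count = len(sample)
  aLoop s (PySem.List.slice t (some (-(s.length : Int))) none) s.length

-- ===== PORT B =====
-- inner while of the failure-table builder: while k > 0 and sample[k] != sample[j]: k = border[k]
-- (fuel only makes the recursion total; it is never exhausted on a real run)
def bCasc (P : List Char) (border : List Nat) (c : Char) : Nat → Nat → Nat
  | 0, k => k
  | fuel + 1, k => if 0 < k ∧ P.getD k ' ' ≠ c then bCasc P border c fuel (border.getD k 0) else k

-- inner while of the scan: while j == m or (j > 0 and sample[j] != sequence[i]): j = border[j]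
def sCasc (P : List Char) (border : List Nat) (c : Char) (m : Nat) : Nat → Nat → Nat
  | 0, j => j
  | fuel + 1, j => if j = m ∨ (0 < j ∧ P.getD j ' ' ≠ c) then sCasc P border c m fuel (border.getD j 0) else j

-- one iteration of the builder's for loop (j = j0 + 1; stores border[j+1])
def bStep (P : List Char) (st : List Nat × Nat) (j0 : Nat) : List Nat × Nat :=
  let j := j0 + 1
  let k1 := bCasc P st.1 (P.getD j ' ') j st.2
  let k2 := if P.getD k1 ' ' = P.getD j ' ' then k1 + 1 else k1
  (st.1.set (j + 1) k2, k2)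

-- one iteration of the scan's for loop
def sStep (P : List Char) (border : List Nat) (m : Nat) (j : Nat) (c : Char) : Nat :=
  let j1 := sCasc P border c m (m + 1) j
  if P.getD j1 ' ' = c then j1 + 1 else j1

def overlap_back_py_alt (sample : String) (sequence : String) : Bool :=
  let s := sample.toList
  let t := sequence.toList
  let m := s.length
  if m = 0 then false
  else
    let bst := (List.range (m - 1)).foldl (bStep s) (List.replicate (m + 1) 0, 0)
    let j := t.foldl (sStep s bst.1 m) 0
    decide (0 < j)

-- ===== PRECONDITION & SPEC =====
def Spec_overlap_back_py (sample : String) (sequence : String) (out : Bool) : Prop := out = overlap_back_py_alt sample sequence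
instance (sample : String) (sequence : String) (out : Bool) : Decidable (Spec_overlap_back_py sample sequence out) := by unfold Spec_overlap_back_py; infer_instance

-- ===== CLAIM (what is proved, stated in full; the proofs are below) =====
def Claim_equal_overlap_back_py : Prop := ∀ (sample : String) (sequence : String), Dom_overlap_back_py sample sequence → Spec_overlap_back_py sample sequence (overlap_back_py sample sequence)

-- ===== LEMMAS AND PROOFS =====

-- ---------- generic suffix facts ----------
theorem sfx_of_sfx_le {a b c : List Char} (ha : a <:+ c) (hb : b <:+ c)
    (h : a.length ≤ b.length) : a <:+ b := by
  rw [← List.reverse_prefix] at ha hb ⊢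
  exact List.prefix_of_prefix_length_le ha hb (by simpa using h)

theorem snoc_sfx_snoc {a b : List Char} {x y : Char} (h : a ++ [x] <:+ b ++ [y]) :
    x = y ∧ a <:+ b := by
  rw [← List.reverse_prefix] at h
  simp only [List.reverse_append, List.reverse_singleton, List.singleton_append] at h
  rcases List.cons_prefix_cons.mp h with ⟨hxy, hp⟩
  exact ⟨hxy, by rwa [List.reverse_prefix] at hp⟩

theorem sfx_snoc {a b : List Char} (x : Char) (h : a <:+ b) : a ++ [x] <:+ b ++ [x] := by
  obtain ⟨w, rfl⟩ := h; exact ⟨w, by simp⟩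

theorem take_snoc (l : List Char) {k : Nat} (h : k < l.length) (d : Char) :
    l.take (k + 1) = l.take k ++ [l.getD k d] := by
  rw [List.take_add_one, List.getElem?_eq_getElem h, List.getD_eq_getElem l d h]; rfl

theorem dropLast_take_succ (l : List Char) {n : Nat} (h : n + 1 ≤ l.length) :
    (l.take (n + 1)).dropLast = l.take n := by
  rw [List.dropLast_eq_take]
  simp [List.take_take, List.length_take]
  omega

-- ---------- border function (longest proper border of P.take j) ----------
def bm (P : List Char) (j : Nat) : Nat :=
  Nat.findGreatest (fun k => P.take k <:+ P.take j) (j - 1)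

theorem bm_lt (P : List Char) {j : Nat} (h : 1 ≤ j) : bm P j < j :=
  lt_of_le_of_lt (Nat.findGreatest_le _) (by omega)

theorem bm_sfx (P : List Char) (j : Nat) : P.take (bm P j) <:+ P.take j := by
  unfold bm
  exact Nat.findGreatest_spec (P := fun k => P.take k <:+ P.take j) (Nat.zero_le _) (by simp)

theorem bm_max (P : List Char) {j k : Nat} (hk : k < j) (hs : P.take k <:+ P.take j) :
    k ≤ bm P j :=
  Nat.le_findGreatest (by omega) hs

-- ---------- automaton state (longest prefix of P that is a suffix of u) ----------
def stf (P u : List Char) : Nat :=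
  Nat.findGreatest (fun k => P.take k <:+ u) P.length

theorem stf_le (P u : List Char) : stf P u ≤ P.length := Nat.findGreatest_le _

theorem stf_sfx (P u : List Char) : P.take (stf P u) <:+ u := by
  unfold stf
  exact Nat.findGreatest_spec (P := fun k => P.take k <:+ u) (Nat.zero_le _) (by simp)

theorem stf_max (P u : List Char) {k : Nat} (hk : k ≤ P.length) (hs : P.take k <:+ u) :
    k ≤ stf P u :=
  Nat.le_findGreatest hk hs

theorem stf_nil (P : List Char) (hm : 0 < P.length) : stf P [] = 0 := by
  have h := stf_sfx P []
  have := List.suffix_nil.mp h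
  have hl : min (stf P []) P.length = 0 := by
    simpa [List.length_take] using congrArg List.length this
  omega

-- ---------- the builder's inner while loop ----------
theorem bCasc_spec (P : List Char) (border : List Nat) (c : Char) :
    ∀ q fuel, q < fuel → q ≤ P.length →
    (∀ i, 1 ≤ i → i ≤ q → border.getD i 0 = bm P i) →
    P.take (bCasc P border c fuel q) <:+ P.take q ∧
    bCasc P border c fuel q ≤ q ∧
    (bCasc P border c fuel q = 0 ∨ P.getD (bCasc P border c fuel q) ' ' = c) ∧
    (∀ k, k ≤ q → P.take k <:+ P.take q → (k = 0 ∨ P.getD k ' ' = c) →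
      k ≤ bCasc P border c fuel q) := by
  intro q
  induction q using Nat.strong_induction_on with
  | _ q IH =>
    intro fuel hf hq hb
    obtain ⟨f, rfl⟩ : ∃ f, fuel = f + 1 := ⟨fuel - 1, by omega⟩
    by_cases hcond : 0 < q ∧ P.getD q ' ' ≠ c
    · -- loop body runs: k := border[q] = bm P q
      have hq1 : 1 ≤ q := hcond.1
      have hbq : border.getD q 0 = bm P q := hb q hq1 le_rfl
      have hlt : bm P q < q := bm_lt P hq1
      have hrec := IH (bm P q) hlt f (by omega) (by omega)
        (fun i h1 h2 => hb i h1 (by omega))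
      rw [show bCasc P border c (f + 1) q = bCasc P border c f (bm P q) by
        simp only [bCasc]; rw [if_pos hcond, hbq]]
      obtain ⟨h1, h2, h3, h4⟩ := hrec
      refine ⟨h1.trans (bm_sfx P q), by omega, h3, ?_⟩
      intro k hk hs hd
      have hkq : k ≠ q := by
        rintro rfl
        rcases hd with h | h
        · omega
        · exact hcond.2 h
      have hkb : k ≤ bm P q := bm_max P (by omega) hs
      have hss : P.take k <:+ P.take (bm P q) :=
        sfx_of_sfx_le hs (bm_sfx P q) (by simp [List.length_take]; omega)
      exact h4 k hkb hss hd
    · -- loop exits immediately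
      rw [show bCasc P border c (f + 1) q = q by simp only [bCasc]; rw [if_neg hcond]]
      refine ⟨List.suffix_refl _, le_rfl, ?_, fun k hk _ _ => hk⟩
      by_cases h0 : q = 0
      · exact Or.inl h0
      · right
        by_contra hne
        exact hcond ⟨by omega, hne⟩

-- ---------- the scan's inner while loop ----------
theorem sCasc_spec (P : List Char) (border : List Nat) (c : Char) (hm : 0 < P.length) :
    ∀ q fuel, q < fuel → q ≤ P.length →
    (∀ i, 1 ≤ i → i ≤ q → border.getD i 0 = bm P i) →
    P.take (sCasc P border c P.length fuel q) <:+ P.take q ∧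
    sCasc P border c P.length fuel q ≤ q ∧
    sCasc P border c P.length fuel q ≠ P.length ∧
    (sCasc P border c P.length fuel q = 0 ∨ P.getD (sCasc P border c P.length fuel q) ' ' = c) ∧
    (∀ k, k ≤ q → P.take k <:+ P.take q → k ≠ P.length → (k = 0 ∨ P.getD k ' ' = c) →
      k ≤ sCasc P border c P.length fuel q) := by
  intro q
  induction q using Nat.strong_induction_on with
  | _ q IH =>
    intro fuel hf hq hb
    obtain ⟨f, rfl⟩ : ∃ f, fuel = f + 1 := ⟨fuel - 1, by omega⟩
    by_cases hcond : q = P.length ∨ (0 < q ∧ P.getD q ' ' ≠ c)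
    · -- loop body runs: j := border[q] = bm P q
      have hq1 : 1 ≤ q := by
        rcases hcond with h | h
        · omega
        · exact h.1
      have hbq : border.getD q 0 = bm P q := hb q hq1 le_rfl
      have hlt : bm P q < q := bm_lt P hq1
      have hrec := IH (bm P q) hlt f (by omega) (by omega)
        (fun i h1 h2 => hb i h1 (by omega))
      rw [show sCasc P border c P.length (f + 1) q = sCasc P border c P.length f (bm P q) by
        simp only [sCasc]; rw [if_pos hcond, hbq]]
      obtain ⟨h1, h2, h3, h4, h5⟩ := hrec
      refine ⟨h1.trans (bm_sfx P q), by omega, h3, h4, ?_⟩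
      intro k hk hs hkm hd
      have hkq : k ≠ q := by
        rintro rfl
        rcases hcond with h | h
        · exact hkm h
        · rcases hd with h' | h'
          · omega
          · exact h.2 h'
      have hkb : k ≤ bm P q := bm_max P (by omega) hs
      have hss : P.take k <:+ P.take (bm P q) :=
        sfx_of_sfx_le hs (bm_sfx P q) (by simp [List.length_take]; omega)
      exact h5 k hkb hss hkm hd
    · -- loop exits immediately
      rw [show sCasc P border c P.length (f + 1) q = q by simp only [sCasc]; rw [if_neg hcond]]
      push Not at hcond
      refine ⟨List.suffix_refl _, le_rfl, hcond.1, ?_, fun k hk _ _ _ => hk⟩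
      by_cases h0 : q = 0
      · exact Or.inl h0
      · right
        by_contra hne
        exact hne (hcond.2 (by omega))

-- ---------- one builder iteration computes the next border ----------
theorem build_step (P : List Char) {j : Nat} (hj1 : 1 ≤ j) (hjm : j < P.length)
    (border : List Nat) (hb : ∀ i, 1 ≤ i → i ≤ j → border.getD i 0 = bm P i) :
    (let r := bCasc P border (P.getD j ' ') j (bm P j)
     if P.getD r ' ' = P.getD j ' ' then r + 1 else r) = bm P (j + 1) := by
  set c := P.getD j ' ' with hc
  have hbmj : bm P j < j := bm_lt P hj1
  obtain ⟨h1, h2, h3, h4⟩ := bCasc_spec P border c (bm P j) j (by omega) (by omega)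
    (fun i hi1 hi2 => hb i hi1 (by omega))
  set r := bCasc P border c j (bm P j) with hr
  have hrj : r < j := by omega
  have hrsfxj : P.take r <:+ P.take j := h1.trans (bm_sfx P j)
  have htj : P.take (j + 1) = P.take j ++ [c] := take_snoc P hjm ' '
  simp only []
  apply le_antisymm
  · -- v ≤ bm P (j+1)
    by_cases hrc : P.getD r ' ' = c
    · rw [if_pos hrc]
      apply bm_max P (by omega)
      have : P.take (r + 1) = P.take r ++ [c] := by
        rw [take_snoc P (by omega) ' ', hrc]
      rw [this, htj]
      exact sfx_snoc c hrsfxj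
    · rw [if_neg hrc]
      have hr0 : r = 0 := h3.resolve_right hrc
      omega
  · -- bm P (j+1) ≤ v
    rcases Nat.eq_zero_or_pos (bm P (j + 1)) with hK0 | hKpos
    · omega
    · obtain ⟨K, hK⟩ : ∃ K, bm P (j + 1) = K + 1 := ⟨bm P (j + 1) - 1, by omega⟩
      have hKlt : bm P (j + 1) < j + 1 := bm_lt P (by omega)
      have hsfxK : P.take (bm P (j + 1)) <:+ P.take (j + 1) := bm_sfx P (j + 1)
      rw [hK] at hsfxK hKlt
      have htK : P.take (K + 1) = P.take K ++ [P.getD K ' '] :=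
        take_snoc P (by omega) ' '
      rw [htK, htj] at hsfxK
      obtain ⟨hKc, hKsfx⟩ := snoc_sfx_snoc hsfxK
      have hKbm : K ≤ bm P j := bm_max P (by omega) hKsfx
      have hKss : P.take K <:+ P.take (bm P j) :=
        sfx_of_sfx_le hKsfx (bm_sfx P j) (by simp [List.length_take]; omega)
      have hKr : K ≤ r := h4 K (by omega) hKss (Or.inr hKc)
      by_cases hrc : P.getD r ' ' = c
      · rw [if_pos hrc]; omega
      · have hr0 : r = 0 := h3.resolve_right hrc
        have : K = 0 := by omega
        rw [this] at hKc
        rw [hr0] at hrc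
        exact absurd hKc hrc

-- ---------- one scan iteration advances the automaton state ----------
theorem scan_step (P : List Char) (hm : 0 < P.length) (border : List Nat)
    (hb : ∀ i, 1 ≤ i → i ≤ P.length → border.getD i 0 = bm P i) (u : List Char) (c : Char) :
    sStep P border P.length (stf P u) c = stf P (u ++ [c]) := by
  set q := stf P u with hq
  have hqle : q ≤ P.length := stf_le P u
  obtain ⟨h1, h2, h3, h4, h5⟩ := sCasc_spec P border c hm q (P.length + 1) (by omega) hqle
    (fun i hi1 hi2 => hb i hi1 (by omega))
  set r := sCasc P border c P.length (P.length + 1) q with hr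
  have hrm : r < P.length := by
    have := h3; omega
  have hrsfxu : P.take r <:+ u := h1.trans ((stf_sfx P u))
  unfold sStep
  rw [← hr]
  apply le_antisymm
  · -- v ≤ stf (u ++ [c])
    by_cases hrc : P.getD r ' ' = c
    · rw [if_pos hrc]
      apply stf_max P (u ++ [c]) (by omega)
      have : P.take (r + 1) = P.take r ++ [c] := by
        rw [take_snoc P hrm ' ', hrc]
      rw [this]
      exact sfx_snoc c hrsfxu
    · rw [if_neg hrc]
      have hr0 : r = 0 := h4.resolve_right hrc
      simp [hr0]
  · -- stf (u ++ [c]) ≤ v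
    rcases Nat.eq_zero_or_pos (stf P (u ++ [c])) with hK0 | hKpos
    · rw [hK0]; exact Nat.zero_le _
    · obtain ⟨K, hK⟩ : ∃ K, stf P (u ++ [c]) = K + 1 := ⟨stf P (u ++ [c]) - 1, by omega⟩
      have hKle : K + 1 ≤ P.length := hK ▸ stf_le P (u ++ [c])
      have hsfxK : P.take (K + 1) <:+ u ++ [c] := hK ▸ stf_sfx P (u ++ [c])
      rw [take_snoc P (by omega) ' '] at hsfxK
      obtain ⟨hKc, hKsfx⟩ := snoc_sfx_snoc hsfxK
      have hKq : K ≤ q := stf_max P u (by omega) hKsfx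
      have hKss : P.take K <:+ P.take q :=
        sfx_of_sfx_le hKsfx (stf_sfx P u) (by simp [List.length_take]; omega)
      have hKr : K ≤ r := h5 K hKq hKss (by omega) (Or.inr hKc)
      by_cases hrc : P.getD r ' ' = c
      · rw [if_pos hrc]; omega
      · have hr0 : r = 0 := h4.resolve_right hrc
        have hK0' : K = 0 := by omega
        rw [hK0'] at hKc
        rw [hr0] at hrc
        exact absurd hKc hrc

-- ---------- builder fold invariant ----------
theorem getD_replicate_zero (m i : Nat) : (List.replicate m (0 : Nat)).getD i 0 = 0 := by
  rcases Nat.lt_or_ge i m with h | h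
  · simp [List.getD, h]
  · rw [List.getD, List.getElem?_eq_none (show (List.replicate m (0:Nat)).length ≤ i by simpa using h)]
    rfl

theorem getD_set_self (l : List Nat) (i v : Nat) (h : i < l.length) :
    (l.set i v).getD i 0 = v := by
  simp [List.getD, h]

theorem getD_set_ne (l : List Nat) (i j v : Nat) (hne : j ≠ i) :
    (l.set i v).getD j 0 = l.getD j 0 := by
  simp [List.getD, (Ne.symm hne : i ≠ j)]

theorem bm_le_one (P : List Char) {j : Nat} (h : j ≤ 1) : bm P j = 0 := by
  unfold bm
  have : j - 1 = 0 := by omega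
  rw [this, Nat.findGreatest_zero]

theorem build_inv (P : List Char) (hm : 0 < P.length) :
    ∀ J, J ≤ P.length - 1 →
    ((List.range J).foldl (bStep P) (List.replicate (P.length + 1) 0, 0)).2 = bm P (J + 1) ∧
    ((List.range J).foldl (bStep P) (List.replicate (P.length + 1) 0, 0)).1.length = P.length + 1 ∧
    (∀ i, i ≤ J + 1 →
      ((List.range J).foldl (bStep P) (List.replicate (P.length + 1) 0, 0)).1.getD i 0 = bm P i) := by
  intro J
  induction J with
  | zero =>
    intro _
    refine ⟨?_, by simp, ?_⟩
    · simp only [List.range_zero, List.foldl_nil]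
      rw [show bm P (0 + 1) = 0 from bm_le_one P le_rfl]
    · intro i hi
      simp only [List.range_zero, List.foldl_nil]
      rw [getD_replicate_zero, bm_le_one P hi]
  | succ J ih =>
    intro hJ
    obtain ⟨ih2, ihlen, ihb⟩ := ih (by omega)
    set st := (List.range J).foldl (bStep P) (List.replicate (P.length + 1) 0, 0) with hst
    have hstep : (List.range (J + 1)).foldl (bStep P) (List.replicate (P.length + 1) 0, 0)
        = bStep P st J := by
      rw [List.range_succ, List.foldl_append, List.foldl_cons, List.foldl_nil]
    have hj1 : 1 ≤ J + 1 := by omega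
    have hjm : J + 1 < P.length := by omega
    have hb : ∀ i, 1 ≤ i → i ≤ J + 1 → st.1.getD i 0 = bm P i :=
      fun i h1 h2 => ihb i h2
    have hkey := build_step P hj1 hjm st.1 hb
    simp only [] at hkey
    have hbval : bStep P st J =
        (st.1.set (J + 2)
          (if P.getD (bCasc P st.1 (P.getD (J+1) ' ') (J+1) st.2) ' ' = P.getD (J+1) ' '
           then bCasc P st.1 (P.getD (J+1) ' ') (J+1) st.2 + 1
           else bCasc P st.1 (P.getD (J+1) ' ') (J+1) st.2),
         (if P.getD (bCasc P st.1 (P.getD (J+1) ' ') (J+1) st.2) ' ' = P.getD (J+1) ' '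
          then bCasc P st.1 (P.getD (J+1) ' ') (J+1) st.2 + 1
          else bCasc P st.1 (P.getD (J+1) ' ') (J+1) st.2)) := rfl
    rw [hstep, hbval, ih2] at *
    rw [ih2] at hkey
    refine ⟨hkey, by simp [ihlen], ?_⟩
    intro i hi
    by_cases hieq : i = J + 2
    · rw [hieq, getD_set_self _ _ _ (by omega), hkey]
    · rw [getD_set_ne _ _ _ _ hieq]
      exact ihb i (by omega)

-- ---------- scan fold invariant ----------
theorem scan_fold' (P : List Char) (border : List Nat) (hm : 0 < P.length)
    (hb : ∀ i, 1 ≤ i → i ≤ P.length → border.getD i 0 = bm P i) :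
    ∀ (u v : List Char), u.foldl (sStep P border P.length) (stf P v) = stf P (v ++ u) := by
  intro u
  induction u with
  | nil => intro v; simp
  | cons c u ih =>
    intro v
    have h1 : sStep P border P.length (stf P v) c = stf P (v ++ [c]) := scan_step P hm border hb v c
    calc (c :: u).foldl (sStep P border P.length) (stf P v)
        = u.foldl (sStep P border P.length) (stf P (v ++ [c])) := by rw [List.foldl_cons, h1]
      _ = stf P ((v ++ [c]) ++ u) := ih (v ++ [c])
      _ = stf P (v ++ c :: u) := by rw [List.append_assoc]; rfl


-- ---------- characterisation of A, characterisation of B ----------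
theorem aLoop_spec (s t : List Char) :
    ∀ c, c ≤ s.length →
    (aLoop (s.take c) (t.drop (t.length - c)) c = true ↔
     ∃ k, 1 ≤ k ∧ k ≤ c ∧ k ≤ t.length ∧ s.take k = t.drop (t.length - k)) := by
  intro c
  induction c with
  | zero =>
    intro _
    show (false = true) ↔ _
    simp only [Bool.false_eq_true, false_iff]
    rintro ⟨k, h1, h2, _, _⟩
    omega
  | succ c ih =>
    intro hc1
    have hcs : c ≤ s.length := by omega
    rw [show aLoop (s.take (c+1)) (t.drop (t.length - (c+1))) (c+1) =
        (if s.take (c+1) = t.drop (t.length - (c+1)) then true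
         else aLoop (PySem.List.slice (s.take (c+1)) none (some (-1)))
                    (PySem.List.slice (t.drop (t.length - (c+1))) (some (-(c:Int))) none) c)
        from rfl]
    by_cases heq : s.take (c+1) = t.drop (t.length - (c+1))
    · rw [if_pos heq]
      have hlen : c + 1 ≤ t.length := by
        have h := congrArg List.length heq
        simp only [List.length_take, List.length_drop] at h
        omega
      exact ⟨fun _ => ⟨c+1, by omega, le_rfl, hlen, heq⟩, fun _ => rfl⟩
    · rw [if_neg heq]
      have hs1 : PySem.List.slice (s.take (c+1)) none (some (-1)) = s.take c := by
        rw [PySem.List.slice_to_neg_one]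
        exact dropLast_take_succ s (by omega)
      rcases Nat.eq_zero_or_pos c with hc0 | hcpos
      · subst hc0
        show (aLoop _ _ 0 = true) ↔ _
        show (false = true) ↔ _
        simp only [Bool.false_eq_true, false_iff]
        rintro ⟨k, h1, h2, h3, h4⟩
        have hk1 : k = 1 := by omega
        subst hk1
        exact heq h4
      · have hs2 : PySem.List.slice (t.drop (t.length - (c+1))) (some (-(c:Int))) none
            = t.drop (t.length - c) := by
          rw [PySem.List.slice_from_neg_natCast _ c hcpos, List.drop_drop]
          congr 1
          simp only [List.length_drop]
          omega
        rw [hs1, hs2, ih hcs]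
        constructor
        · rintro ⟨k, h1, h2, h3, h4⟩
          exact ⟨k, h1, by omega, h3, h4⟩
        · rintro ⟨k, h1, h2, h3, h4⟩
          refine ⟨k, h1, ?_, h3, h4⟩
          rcases Nat.lt_or_ge k (c+1) with h | h
          · omega
          · exfalso
            have hk : k = c + 1 := by omega
            subst hk
            exact heq h4

theorem A_spec (sample sequence : String) :
    overlap_back_py sample sequence = true ↔
    ∃ k, 1 ≤ k ∧ k ≤ sample.toList.length ∧ k ≤ sequence.toList.length ∧
      sample.toList.take k = sequence.toList.drop (sequence.toList.length - k) := by
  by_cases hm : sample.toList.length = 0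
  · have hA : overlap_back_py sample sequence = false := by
      unfold overlap_back_py
      simp only [hm]
      rfl
    rw [hA]
    simp only [Bool.false_eq_true, false_iff]
    rintro ⟨k, h1, h2, _, _⟩
    omega
  · have hm' : 0 < sample.toList.length := by omega
    have hsl : PySem.List.slice sequence.toList (some (-(sample.toList.length : Int))) none
        = sequence.toList.drop (sequence.toList.length - sample.toList.length) :=
      PySem.List.slice_from_neg_natCast _ _ hm'
    have hc := aLoop_spec sample.toList sequence.toList sample.toList.length le_rfl
    rw [List.take_length] at hc
    show aLoop sample.toList
        (PySem.List.slice sequence.toList (some (-(sample.toList.length : Int))) none)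
        sample.toList.length = true ↔ _
    rw [hsl, hc]

theorem B_spec (sample sequence : String) :
    overlap_back_py_alt sample sequence = true ↔
    ∃ k, 1 ≤ k ∧ k ≤ sample.toList.length ∧ sample.toList.take k <:+ sequence.toList := by
  set s := sample.toList with hs
  set t := sequence.toList with ht
  have hform : overlap_back_py_alt sample sequence
      = if s.length = 0 then false else
          decide (0 < t.foldl (sStep s
            ((List.range (s.length - 1)).foldl (bStep s)
              (List.replicate (s.length + 1) 0, 0)).1 s.length) 0) := rfl
  by_cases hm : s.length = 0
  · rw [hform, if_pos hm]
    simp only [Bool.false_eq_true, false_iff]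
    rintro ⟨k, h1, h2, _⟩
    omega
  · have hm' : 0 < s.length := by omega
    set border := ((List.range (s.length - 1)).foldl (bStep s) (List.replicate (s.length + 1) 0, 0)).1 with hbd
    have hB : overlap_back_py_alt sample sequence
        = decide (0 < t.foldl (sStep s border s.length) 0) := by
      rw [hform, if_neg hm]
    obtain ⟨_, _, hbord⟩ := build_inv s hm' (s.length - 1) le_rfl
    have hb : ∀ i, 1 ≤ i → i ≤ s.length → border.getD i 0 = bm s i := by
      intro i h1 h2
      exact hbord i (by omega)
    have hscan : t.foldl (sStep s border s.length) 0 = stf s t := by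
      rw [show (0:Nat) = stf s [] from (stf_nil s hm').symm,
          scan_fold' s border hm' hb t []]
      rfl
    rw [hB, hscan, decide_eq_true_iff]
    constructor
    · intro h
      exact ⟨stf s t, h, stf_le s t, stf_sfx s t⟩
    · rintro ⟨k, h1, h2, h3⟩
      have := stf_max s t h2 h3
      omega

-- ---------- bridge ----------
theorem bridge (s t : List Char) (k : Nat) (hk : k ≤ s.length) :
    (k ≤ t.length ∧ s.take k = t.drop (t.length - k)) ↔ s.take k <:+ t := by
  constructor
  · rintro ⟨hkt, heq⟩
    rw [heq]; exact List.drop_suffix _ _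
  · intro h
    have hl : (s.take k).length = k := by simp [List.length_take]; omega
    have hle := List.IsSuffix.length_le h
    rw [hl] at hle
    refine ⟨hle, ?_⟩
    have := List.suffix_iff_eq_drop.mp h
    rwa [hl] at this


-- ===== VERDICT (by name: the statement is the Claim_ definition above) =====
theorem overlap_back_py_spec : Claim_equal_overlap_back_py := by
  intro sample sequence _
  unfold Spec_overlap_back_py
  rw [Bool.eq_iff_iff, A_spec, B_spec]
  constructor
  · rintro ⟨k, h1, h2, h3, h4⟩
    exact ⟨k, h1, h2, (bridge _ _ k h2).mp ⟨h3, h4⟩⟩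
  · rintro ⟨k, h1, h2, h3⟩
    obtain ⟨h4, h5⟩ := (bridge _ _ k h2).mpr h3
    exact ⟨k, h1, h2, h4, h5⟩
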